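-- pv_equiv track=rewrite | github.com/qifiqi/codebase | python_codebase/python小玩意/python水星路由器加密破解攻击-未完成/main.py | securityEncode
-- ===== SOURCE A (Python) =====
-- def securityEncode(b):
--     a = "RDpbLfCPsJZ7fiv"
--     e = ""
--     c = "yLwVl0zKqws7LgKPRQ84Mdt708T1qQ3Ha7xv3H7NyU84p21BriUWBU43odz3iP4rBL3cD02KZciXTysVXiV8ngg6vL48rPJyAUw0HurW20xqxv9aYb4M9wK1Ae0wlro510qXeU07kV57fQMc8L6aLgMLwygtc0F10a0Dg70TOoouyFhdysuRMO51yY5ZlOZZLEal1h0t9YQW0Ko7oBwmCAHoic4HYbUyVeU3sfQ1xtXcPcf1aT303wAQhv66qzW"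
--     l = 118
--     n = 187
--
--     g = len(a)
--     h = len(b)
--     k = len(c)
--     f = g if g > h else h
--     for p in range(f):
--         n = l = 187
--         if p >= g:
--             n = ord(b[p])
--         else:
--             if p >= h:
--                 l = ord(a[p])
--
--             else:
--                 l = ord(a[p])
--                 n = ord(b[p])
--
--         # e += c.charAt((l ^ n) % k)
--         e += c[(l ^ n) % k]
--     return e
-- ===== SOURCE B (Python) =====
-- _A = "RDpbLfCPsJZ7fiv"
-- _C = "yLwVl0zKqws7LgKPRQ84Mdt708T1qQ3Ha7xv3H7NyU84p21BriUWBU43odz3iP4rBL3cD02KZciXTysVXiV8ngg6vL48rPJyAUw0HurW20xqxv9aYb4M9wK1Ae0wlro510qXeU07kV57fQMc8L6aLgMLwygtc0F10a0Dg70TOoouyFhdysuRMO51yY5ZlOZZLEal1h0t9YQW0Ko7oBwmCAHoic4HYbUyVeU3sfQ1xtXcPcf1aT303wAQhv66qzW"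
-- # Precomputed once: for each key position p, a 256-entry substitution string mapping
-- # an input byte x to the output character; and the fixed output for key-only positions.
-- _TABLE = [''.join(_C[(ord(k) ^ x) % len(_C)] for x in range(256)) for k in _A]
-- _TAIL = ''.join(_C[(ord(k) ^ 187) % len(_C)] for k in _A)
--
-- def securityEncode(b):
--     head = ''.join(_TABLE[p][ord(ch)] for p, ch in enumerate(b[:len(_A)]))
--     if len(b) < len(_A):
--         return head + _TAIL[len(b):]
--     return head + ''.join(_C[(ord(ch) ^ 187) % len(_C)] for ch in b[len(_A):])
-- ===== Notes on version B (the rewrite author's own statement) =====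
-- stated objective: alternative
-- what changed: Replaces the branching index loop by a table-driven segmented encoder: 15 precomputed 256-entry substitution strings (one per key character) translate the first min(15,len(b)) input characters, a precomputed constant string supplies the key-only tail when b is short, and a simple XOR-with-187 map handles b's excess characters.
import Mathlib
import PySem

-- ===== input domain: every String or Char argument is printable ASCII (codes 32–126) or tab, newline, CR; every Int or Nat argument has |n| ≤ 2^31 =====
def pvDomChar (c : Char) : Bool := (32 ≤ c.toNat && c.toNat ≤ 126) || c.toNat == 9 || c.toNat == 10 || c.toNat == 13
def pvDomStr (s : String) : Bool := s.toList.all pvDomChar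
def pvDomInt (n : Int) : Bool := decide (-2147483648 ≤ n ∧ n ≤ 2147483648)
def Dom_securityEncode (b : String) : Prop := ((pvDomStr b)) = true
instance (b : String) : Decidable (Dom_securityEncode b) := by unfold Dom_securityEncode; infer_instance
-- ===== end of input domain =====

-- B is a table-driven segmented encoder: precomputed 256-entry substitution strings
-- (one per key character) for the overlap, a precomputed constant tail for short inputs,
-- and an XOR-with-187 map for the excess of long inputs (alternative decomposition).

-- ===== PORT A =====
-- A indexes a[p], b[p], c[...] only at in-range positions; .getD ' ' is a totality guard only.
def securityEncode (b : String) : String :=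
  let a := "RDpbLfCPsJZ7fiv"
  let c := "yLwVl0zKqws7LgKPRQ84Mdt708T1qQ3Ha7xv3H7NyU84p21BriUWBU43odz3iP4rBL3cD02KZciXTysVXiV8ngg6vL48rPJyAUw0HurW20xqxv9aYb4M9wK1Ae0wlro510qXeU07kV57fQMc8L6aLgMLwygtc0F10a0Dg70TOoouyFhdysuRMO51yY5ZlOZZLEal1h0t9YQW0Ko7oBwmCAHoic4HYbUyVeU3sfQ1xtXcPcf1aT303wAQhv66qzW"
  let g : Int := PySem.Str.len a
  let h : Int := PySem.Str.len b
  let k : Int := PySem.Str.len c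
  let f : Int := if g > h then g else h
  let e : List Char := (PySem.List.pyRange 0 f 1).foldl (fun e p =>
    let ln : Int × Int :=
      if p ≥ g then (187, (((PySem.Str.pyGet? b p).getD ' ').toNat : Int))
      else if p ≥ h then ((((PySem.Str.pyGet? a p).getD ' ').toNat : Int), 187)
      else ((((PySem.Str.pyGet? a p).getD ' ').toNat : Int), (((PySem.Str.pyGet? b p).getD ' ').toNat : Int))
    e ++ [(PySem.Str.pyGet? c (PySem.Int.mod (PySem.Int.bxor ln.1 ln.2) k)).getD ' ']) []
  String.mk e

-- ===== PORT B =====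
-- module-level constants of Source B (built once there; plain defs here)
def pvKeyA : List Char := "RDpbLfCPsJZ7fiv".toList
def pvC : List Char := "yLwVl0zKqws7LgKPRQ84Mdt708T1qQ3Ha7xv3H7NyU84p21BriUWBU43odz3iP4rBL3cD02KZciXTysVXiV8ngg6vL48rPJyAUw0HurW20xqxv9aYb4M9wK1Ae0wlro510qXeU07kV57fQMc8L6aLgMLwygtc0F10a0Dg70TOoouyFhdysuRMO51yY5ZlOZZLEal1h0t9YQW0Ko7oBwmCAHoic4HYbUyVeU3sfQ1xtXcPcf1aT303wAQhv66qzW".toList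
-- _TABLE: per key character, a 256-entry substitution string (ord-indexed)
def pvTable : List (List Char) :=
  pvKeyA.map (fun k =>
    (List.range 256).map (fun x => pvC.getD ((k.toNat ^^^ x) % pvC.length) (Char.ofNat 187)))
-- _TAIL: output for key-only positions
def pvTail : List Char :=
  pvKeyA.map (fun k => pvC.getD ((k.toNat ^^^ 187) % pvC.length) (Char.ofNat 187))

-- all indexings in Source B are in range on Dom; .getD is a totality guard only
def securityEncode_alt (b : String) : String :=
  let bs := b.toList
  let head := (PySem.List.enumerate (bs.take pvKeyA.length)).map
    (fun pc => (pvTable.getD pc.1.toNat []).getD pc.2.toNat (Char.ofNat 187))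
  if bs.length < pvKeyA.length then
    String.mk (head ++ pvTail.drop bs.length)
  else
    String.mk (head ++ (bs.drop pvKeyA.length).map
      (fun ch => pvC.getD ((ch.toNat ^^^ 187) % pvC.length) (Char.ofNat 187)))

-- ===== PRECONDITION & SPEC =====
def Spec_securityEncode (b : String) (out : String) : Prop := out = securityEncode_alt b
instance (b : String) (out : String) : Decidable (Spec_securityEncode b out) := by unfold Spec_securityEncode; infer_instance

-- ===== CLAIM (what is proved, stated in full; the proofs are below) =====
def Claim_equal_securityEncode : Prop := ∀ (b : String), Dom_securityEncode b → Spec_securityEncode b (securityEncode b)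

-- ===== LEMMAS AND PROOFS =====

theorem pvKeyA_length : pvKeyA.length = 15 := by decide

set_option maxRecDepth 8192 in
theorem pvC_length : pvC.length = 255 := by decide

theorem pvTable_length : pvTable.length = 15 := by
  rw [pvTable, List.length_map, pvKeyA_length]

set_option maxRecDepth 8192 in
-- the common core: A's character pick = the pvC.getD form used throughout B
theorem pyGetC_eq (m n : Nat) :
    (PySem.Str.pyGet? "yLwVl0zKqws7LgKPRQ84Mdt708T1qQ3Ha7xv3H7NyU84p21BriUWBU43odz3iP4rBL3cD02KZciXTysVXiV8ngg6vL48rPJyAUw0HurW20xqxv9aYb4M9wK1Ae0wlro510qXeU07kV57fQMc8L6aLgMLwygtc0F10a0Dg70TOoouyFhdysuRMO51yY5ZlOZZLEal1h0t9YQW0Ko7oBwmCAHoic4HYbUyVeU3sfQ1xtXcPcf1aT303wAQhv66qzW"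
      (PySem.Int.mod (PySem.Int.bxor (m : Int) (n : Int)) 255)).getD ' '
    = pvC.getD ((m ^^^ n) % 255) (Char.ofNat 187) := by
  rw [PySem.Int.bxor_natCast, show (255:Int) = ((255:Nat):Int) from rfl,
      PySem.Int.mod_natCast, PySem.Str.pyGet?_natCast]
  have hlt : (m ^^^ n) % 255 < 255 := Nat.mod_lt _ (by omega)
  rw [List.getElem?_eq_getElem (by rw [show ("yLwVl0zKqws7LgKPRQ84Mdt708T1qQ3Ha7xv3H7NyU84p21BriUWBU43odz3iP4rBL3cD02KZciXTysVXiV8ngg6vL48rPJyAUw0HurW20xqxv9aYb4M9wK1Ae0wlro510qXeU07kV57fQMc8L6aLgMLwygtc0F10a0Dg70TOoouyFhdysuRMO51yY5ZlOZZLEal1h0t9YQW0Ko7oBwmCAHoic4HYbUyVeU3sfQ1xtXcPcf1aT303wAQhv66qzW".toList).length = 255 from pvC_length]; exact hlt),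
      Option.getD_some, List.getD_eq_getElem _ _ (by rw [pvC_length]; exact hlt)]
  rfl

-- B's table lookup evaluates to the pvC.getD form, for in-range indices
theorem table_lookup (p x : Nat) (hp : p < 15) (hx : x < 256) :
    (pvTable.getD p []).getD x (Char.ofNat 187)
    = pvC.getD (((pvKeyA[p]'(pvKeyA_length ▸ hp)).toNat ^^^ x) % 255) (Char.ofNat 187) := by
  have h1 : pvTable.getD p [] =
      (List.range 256).map (fun y =>
        pvC.getD (((pvKeyA[p]'(pvKeyA_length ▸ hp)).toNat ^^^ y) % pvC.length) (Char.ofNat 187)) := by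
    rw [List.getD_eq_getElem _ _ (by rw [pvTable_length]; exact hp)]
    simp only [pvTable, List.getElem_map]
  rw [h1, List.getD_eq_getElem _ _ (by simp only [List.length_map, List.length_range]; exact hx)]
  simp only [List.getElem_map, List.getElem_range, pvC_length]

set_option maxRecDepth 8192 in
set_option maxHeartbeats 1000000 in
theorem securityEncode_eq_alt (b : String) (hdom : Dom_securityEncode b) :
    securityEncode b = securityEncode_alt b := by
  have hchar : ∀ (k : Nat) (hk : k < b.toList.length), (b.toList[k]).toNat < 256 := by
    intro k hk
    have := List.all_eq_true.mp hdom _ (List.getElem_mem hk)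
    simp only [pvDomChar, Bool.or_eq_true, Bool.and_eq_true, decide_eq_true_eq, beq_iff_eq] at this
    omega
  simp only [securityEncode, securityEncode_alt]
  rw [PySem.List.foldl_append_singleton_eq_map, PySem.List.pyRange_one, List.map_map, List.nil_append]
  have hlen : PySem.Str.len b = (b.toList.length : Int) := PySem.Str.len_eq b
  have haLen : PySem.Str.len "RDpbLfCPsJZ7fiv" = 15 := by
    rw [PySem.Str.len_eq]; exact_mod_cast pvKeyA_length
  have hcLen : PySem.Str.len
      "yLwVl0zKqws7LgKPRQ84Mdt708T1qQ3Ha7xv3H7NyU84p21BriUWBU43odz3iP4rBL3cD02KZciXTysVXiV8ngg6vL48rPJyAUw0HurW20xqxv9aYb4M9wK1Ae0wlro510qXeU07kV57fQMc8L6aLgMLwygtc0F10a0Dg70TOoouyFhdysuRMO51yY5ZlOZZLEal1h0t9YQW0Ko7oBwmCAHoic4HYbUyVeU3sfQ1xtXcPcf1aT303wAQhv66qzW" = 255 := by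
    rw [PySem.Str.len_eq]; exact_mod_cast pvC_length
  rw [hlen, haLen, hcLen]
  simp only [pvKeyA_length]
  set h : Nat := b.toList.length with hh
  by_cases hshort : h < 15
  · -- h < 15: head ++ tail of the constant
    rw [if_pos (show (15:Int) > (h:Int) from by omega), if_pos hshort]
    congr 1
    apply List.ext_getElem
    · simp only [List.length_map, List.length_range, PySem.List.length_enumerate,
        List.length_append, List.length_take, List.length_drop, pvTail, pvKeyA_length]
      omega
    · intro k h1 h2
      simp only [List.length_map, List.length_range] at h1
      simp only [List.getElem_map, List.getElem_range, Function.comp_apply, zero_add]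
      by_cases hk : k < h
      · -- overlap
        rw [if_neg (by omega), if_neg (by omega)]
        rw [List.getElem_append_left (by
          simp only [List.length_map, PySem.List.length_enumerate, List.length_take]; omega)]
        simp only [List.getElem_map, PySem.List.getElem_enumerate]
        rw [List.getElem_take]
        rw [PySem.Str.pyGet?_natCast, PySem.Str.pyGet?_natCast,
            List.getElem?_eq_getElem (by rw [show "RDpbLfCPsJZ7fiv".toList.length = 15 from pvKeyA_length]; omega),
            List.getElem?_eq_getElem (by omega),
            Option.getD_some, Option.getD_some]
        rw [pyGetC_eq]
        rw [show ((0:Int) + (k:Int)).toNat = k from by omega]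
        rw [table_lookup k _ (by omega) (hchar k (by omega))]
        rfl
      · -- key-only tail
        rw [if_neg (by omega), if_pos (by omega)]
        rw [List.getElem_append_right (by
          simp only [List.length_map, PySem.List.length_enumerate, List.length_take]; omega)]
        rw [PySem.Str.pyGet?_natCast,
            List.getElem?_eq_getElem (by rw [show "RDpbLfCPsJZ7fiv".toList.length = 15 from pvKeyA_length]; omega),
            Option.getD_some]
        have hx := pyGetC_eq ("RDpbLfCPsJZ7fiv".toList[k]'(by
          rw [show "RDpbLfCPsJZ7fiv".toList.length = 15 from pvKeyA_length]; omega)).toNat 187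
        rw [show ((187:Nat):Int) = (187:Int) from rfl] at hx
        rw [hx]
        simp only [List.length_map, PySem.List.length_enumerate, List.length_take]
        rw [List.getElem_drop]
        simp only [pvTail, List.getElem_map, pvC_length]
        congr 3
        simp only [show h + (k - min 15 b.toList.length) = k from by omega]
        rfl
  · -- h ≥ 15: head ++ xor-187 map of the excess
    rw [if_neg (show ¬ (15:Int) > (h:Int) from by omega), if_neg hshort]
    congr 1
    apply List.ext_getElem
    · simp only [List.length_map, List.length_range, PySem.List.length_enumerate,
        List.length_append, List.length_take, List.length_drop]
      omega
    · intro k h1 h2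
      simp only [List.length_map, List.length_range] at h1
      simp only [List.getElem_map, List.getElem_range, Function.comp_apply, zero_add]
      by_cases hk : k < 15
      · -- overlap
        rw [if_neg (by omega), if_neg (by omega)]
        rw [List.getElem_append_left (by
          simp only [List.length_map, PySem.List.length_enumerate, List.length_take]; omega)]
        simp only [List.getElem_map, PySem.List.getElem_enumerate]
        rw [List.getElem_take]
        rw [PySem.Str.pyGet?_natCast, PySem.Str.pyGet?_natCast,
            List.getElem?_eq_getElem (by rw [show "RDpbLfCPsJZ7fiv".toList.length = 15 from pvKeyA_length]; omega),
            List.getElem?_eq_getElem (by omega),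
            Option.getD_some, Option.getD_some]
        rw [pyGetC_eq]
        rw [show ((0:Int) + (k:Int)).toNat = k from by omega]
        rw [table_lookup k _ (by omega) (hchar k (by omega))]
        rfl
      · -- input-only excess
        rw [if_pos (by omega)]
        rw [List.getElem_append_right (by
          simp only [List.length_map, PySem.List.length_enumerate, List.length_take]; omega)]
        rw [PySem.Str.pyGet?_natCast, List.getElem?_eq_getElem (by omega), Option.getD_some]
        have := pyGetC_eq 187 ((b.toList[k]'(by omega)).toNat)
        rw [show ((187:Nat):Int) = (187:Int) from rfl] at this
        rw [this]
        simp only [List.length_map, PySem.List.length_enumerate, List.length_take,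
          List.getElem_map, List.getElem_drop, pvC_length]
        simp only [show (15:Nat) + (k - min 15 b.toList.length) = k from by omega]
        rw [Nat.xor_comm]

-- ===== VERDICT (by name: the statement is the Claim_ definition above) =====
theorem securityEncode_spec : Claim_equal_securityEncode := by
  intro b hdom
  unfold Spec_securityEncode
  exact securityEncode_eq_alt b hdom
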